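-- pv_equiv track=rewrite | github.com/Ad1999-dev/Ai-and-Education | data/raw/submissions/s25/assignment-6-n-gram-complete-submissions/user_81cbb5e0-9011-7077-7e4e-7aca1564666c/NgramAutocomplete.py | create_frequency_tables
-- ===== SOURCE A (Python) =====
-- def create_frequency_tables(document, n):
--     """
--     This function constructs a list of `n` frequency tables for an n-gram model, each table capturing character frequencies with increasing conditional dependencies.
--
--     - **Parameters**:
--         - `document`: The text document used to train the model.
--         - `n`: The number of value of `n` for the n-gram model.
--
--     - **Returns**:
--         - Returns a list of n frequency tables.
--     """
--
--     tables = []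
--
--     for i in range(1, n+1):
--         table = {}
--
--         for j in range(len(document) - i + 1):
--             ngram = document[j: j + i]
--             if ngram in table:
--                 table[ngram] += 1
--             else:
--                 table[ngram] = 1
--
--         tables.append(table)
--
--     return tables
-- ===== SOURCE B (Python) =====
-- def create_frequency_tables(document, n):
--     """Position-outer re-implementation: one pass over starting positions,
--     growing the n-gram incrementally instead of slicing per length."""
--     tables = [{} for _ in range(n)]
--     L = len(document)
--     for j in range(L):
--         sub = ""
--         for i in range(1, min(n, L - j) + 1):
--             sub += document[j + i - 1]
--             table = tables[i - 1]
--             table[sub] = table.get(sub, 0) + 1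
--     return tables
-- ===== Notes on version B (the rewrite author's own statement) =====
-- stated objective: alternative
-- what changed: B swaps the loop nesting: instead of A's lengths-outer pass building each table from independent slices document[j:j+i], B pre-allocates n empty dicts and makes one pass over starting positions j, growing the n-gram one character at a time and updating table i-1 in the inner loop; insertion order of every dict is provably identical.
import Mathlib
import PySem

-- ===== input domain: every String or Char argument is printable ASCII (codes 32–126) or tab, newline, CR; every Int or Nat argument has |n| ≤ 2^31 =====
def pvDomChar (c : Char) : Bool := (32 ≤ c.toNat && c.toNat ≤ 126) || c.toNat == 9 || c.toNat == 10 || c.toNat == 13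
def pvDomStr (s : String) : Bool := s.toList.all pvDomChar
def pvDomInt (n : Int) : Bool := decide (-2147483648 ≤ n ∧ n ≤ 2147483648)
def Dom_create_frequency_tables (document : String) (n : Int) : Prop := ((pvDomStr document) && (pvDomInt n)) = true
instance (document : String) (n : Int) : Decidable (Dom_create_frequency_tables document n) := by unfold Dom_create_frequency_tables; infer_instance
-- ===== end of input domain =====

-- B iterates starting positions once, growing each n-gram incrementally and updating all n tables per position, instead of A's lengths-outer pass with independent slices; alternative decomposition, same exact tables.


-- ===== PORT A =====
-- lengths-outer: for i in 1..n, one fresh dict per i, counting the slices document[j:j+i]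
def create_frequency_tables (document : String) (n : Int) : List (List (String × Int)) :=
  (PySem.List.pyRange 1 (n + 1) 1).foldl (fun tables i =>
    let table :=
      (PySem.List.pyRange 0 (PySem.Str.len document - i + 1) 1).foldl (fun table j =>
        let ngram := PySem.Str.slice document (some j) (some (j + i))
        if table.contains ngram then table.insert ngram (table.getD ngram 0 + 1)
        else table.insert ngram 1) PySem.Dict.empty
    tables ++ [table.items]) []

-- ===== PORT B =====
-- one step of B's inner loop: extend the current substring by document[j+i-1] and bump tables[i-1][sub]
def cfAltInner (s : List Char) (j : Int) (st : List (PySem.Dict String Int) × List Char) (i : Int) :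
    List (PySem.Dict String Int) × List Char :=
  let sub := st.2 ++ [PySem.List.pyGetD s (j + i - 1) ' ']
  let key := String.ofList sub
  let table := PySem.List.pyGetD st.1 (i - 1) PySem.Dict.empty
  (PySem.List.pySetD st.1 (i - 1) (table.insert key (table.getD key 0 + 1)), sub)

-- positions-outer: pre-allocate n empty dicts, then one pass over starting positions j
def create_frequency_tables_alt (document : String) (n : Int) : List (List (String × Int)) :=
  let s := document.toList
  let L : Int := PySem.Str.len document
  let tables0 : List (PySem.Dict String Int) := (PySem.List.pyRange 0 n 1).map (fun _ => PySem.Dict.empty)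
  (((PySem.List.pyRange 0 L 1).foldl (fun tables j =>
      ((PySem.List.pyRange 1 (min n (L - j) + 1) 1).foldl (cfAltInner s j) (tables, ([] : List Char))).1)
    tables0)).map (·.items)

-- ===== PRECONDITION & SPEC =====
def Spec_create_frequency_tables (document : String) (n : Int) (out : List (List (String × Int))) : Prop := out = create_frequency_tables_alt document n
instance (document : String) (n : Int) (out : List (List (String × Int))) : Decidable (Spec_create_frequency_tables document n out) := by unfold Spec_create_frequency_tables; infer_instance

-- ===== CLAIM (what is proved, stated in full; the proofs are below) =====
def Claim_equal_create_frequency_tables : Prop := ∀ (document : String) (n : Int), Dom_create_frequency_tables document n → Spec_create_frequency_tables document n (create_frequency_tables document n)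

-- ===== LEMMAS AND PROOFS =====

-- the n-gram of length i starting at position j, and the counting update, shared vocabulary of both proofs
def cfKey (s : List Char) (j i : Nat) : String := String.ofList ((s.drop j).take i)

def cfBump (d : PySem.Dict String Int) (k : String) : PySem.Dict String Int := d.modify k 0 (· + 1)

-- A's table for length i as a plain fold of bumps
def cfTblI (s : List Char) (i : Int) : PySem.Dict String Int :=
  (PySem.List.pyRange 0 ((s.length : Int) - i + 1) 1).foldl
    (fun d j => cfBump d (cfKey s j.toNat i.toNat)) PySem.Dict.empty

lemma cfA_char (document : String) (n : Int) :
    create_frequency_tables document n =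
      (PySem.List.pyRange 1 (n + 1) 1).map (fun i => (cfTblI document.toList i).items) := by
  unfold create_frequency_tables
  rw [PySem.List.foldl_append_singleton_eq_map]
  rw [List.nil_append]
  apply List.map_congr_left
  intro i hi
  have hi1 : 1 ≤ i := (PySem.List.mem_pyRange_one.mp hi).1
  congr 1
  unfold cfTblI
  have hL : PySem.Str.len document = (document.toList.length : Int) := by
    simp [PySem.Str.len_eq]
  rw [hL]
  apply PySem.List.foldl_congr_mem
  intro d j hj
  have hj0 : 0 ≤ j := (PySem.List.mem_pyRange_one.mp hj).1
  have hkey : PySem.Str.slice document (some j) (some (j + i)) = cfKey document.toList j.toNat i.toNat := by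
    unfold PySem.Str.slice cfKey
    congr 1
    rw [PySem.Chars.slice_eq_listSlice, PySem.List.slice_toNat _ hj0 (by omega)]
    congr 1
    omega
  rw [hkey]
  by_cases hc : d.contains (cfKey document.toList j.toNat i.toNat) = true
  · simp only [hc, if_true]
    rfl
  · simp only [hc]
    simp only [Bool.false_eq_true, if_false]
    unfold cfBump PySem.Dict.modify
    rw [PySem.Dict.getD_of_not_contains (h := by simpa using hc)]
    norm_num

lemma cf_inner_len (s : List Char) (j : Int) :
    ∀ (l : List Int) (st : List (PySem.Dict String Int) × List Char),
      ((l.foldl (cfAltInner s j) st).1).length = st.1.length := by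
  intro l
  induction l with
  | nil => intro st; rfl
  | cons x xs ih =>
      intro st
      rw [List.foldl_cons, ih]
      simp [cfAltInner, PySem.List.length_pySetD]

lemma cf_inner_spec (s : List Char) (n j : Int) (hj : 0 ≤ j) :
    ∀ (t : Nat) (a : Int) (tables : List (PySem.Dict String Int)) (sub : List Char) (k : Nat),
      1 ≤ a →
      (min n ((s.length : Int) - j) + 1 - a).toNat = t →
      min n ((s.length : Int) - j) ≤ (tables.length : Int) →
      sub = (s.drop j.toNat).take (a - 1).toNat →
      (((PySem.List.pyRange a (min n ((s.length : Int) - j) + 1) 1).foldl (cfAltInner s j)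
          (tables, sub)).1)[k]? =
        if a ≤ (k : Int) + 1 ∧ (k : Int) + 1 ≤ min n ((s.length : Int) - j)
        then (tables[k]?).map (fun d => cfBump d (cfKey s j.toNat (k + 1)))
        else tables[k]? := by
  intro t
  induction t with
  | zero =>
      intro a tables sub k ha hm hlen hsub
      rw [PySem.List.pyRange_one_eq_nil (by omega)]
      simp only [List.foldl_nil]
      rw [if_neg (by omega)]
  | succ t ih =>
      intro a tables sub k ha hm hlen hsub
      have halt : a < min n ((s.length : Int) - j) + 1 := by omega
      have haL : a ≤ (s.length : Int) - j := by omega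
      have hlt : (a - 1).toNat < tables.length := by omega
      rw [PySem.List.pyRange_one_cons (by omega), List.foldl_cons]
      have hchar : PySem.List.pyGetD s (j + a - 1) ' ' = s[(j + a - 1).toNat] :=
        PySem.List.pyGetD_eq_getElem s ' ' (by omega) (by omega)
      have hsub' : sub ++ [PySem.List.pyGetD s (j + a - 1) ' '] = (s.drop j.toNat).take ((a + 1) - 1).toNat := by
        rw [hchar, hsub]
        have h1 : ((a + 1) - 1).toNat = (a - 1).toNat + 1 := by omega
        rw [h1, List.take_add_one]
        congr 1
        have hb : (a - 1).toNat < (s.drop j.toNat).length := by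
          rw [List.length_drop]; omega
        have hidx2 : j.toNat + (a - 1).toNat = (j + a - 1).toNat := by omega
        have h2 : (s.drop j.toNat)[(a-1).toNat]? = s[(j + a - 1).toNat]? := by
          rw [List.getElem?_drop, hidx2]
        rw [h2, List.getElem?_eq_getElem (by omega)]
        rfl
      have hkey : String.ofList ((s.drop j.toNat).take ((a + 1) - 1).toNat) = cfKey s j.toNat a.toNat := by
        unfold cfKey
        congr 2
        omega
      have hstep : cfAltInner s j (tables, sub) a =
          (tables.set (a - 1).toNat (cfBump tables[(a - 1).toNat] (cfKey s j.toNat a.toNat)),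
           (s.drop j.toNat).take ((a + 1) - 1).toNat) := by
        unfold cfAltInner
        simp only [hsub']
        rw [hkey]
        rw [PySem.List.pySetD_of_nonneg _ _ (by omega)]
        rw [PySem.List.pyGetD_eq_getElem tables PySem.Dict.empty (by omega) (by omega)]
        rfl
      rw [hstep]
      rw [ih (a + 1) _ _ k (by omega) (by omega) (by rw [List.length_set]; omega) rfl]
      by_cases hcase : k = (a - 1).toNat
      · subst hcase
        have hset : (tables.set (a - 1).toNat (cfBump tables[(a - 1).toNat] (cfKey s j.toNat a.toNat)))[(a - 1).toNat]? = some (cfBump tables[(a - 1).toNat] (cfKey s j.toNat a.toNat)) := by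
          rw [List.getElem?_set, if_pos rfl, if_pos hlt]
        rw [hset, if_neg (by omega), if_pos (by constructor <;> omega)]
        rw [List.getElem?_eq_getElem hlt]
        simp only [Option.map_some]
        rw [show a.toNat = (a - 1).toNat + 1 by omega]
      · have hset : (tables.set (a - 1).toNat (cfBump tables[(a - 1).toNat] (cfKey s j.toNat a.toNat)))[k]? = tables[k]? := by
          rw [List.getElem?_set, if_neg (fun h => hcase h.symm)]
        rw [hset]
        have hiff : (a + 1 ≤ (k : Int) + 1 ∧ (k : Int) + 1 ≤ min n ((s.length : Int) - j)) ↔ (a ≤ (k : Int) + 1 ∧ (k : Int) + 1 ≤ min n ((s.length : Int) - j)) := by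
          omega
        simp only [hiff]

lemma cf_outer_spec (s : List Char) (n : Int) :
    ∀ (t : Nat) (b : Int) (tables : List (PySem.Dict String Int)) (k : Nat),
      0 ≤ b →
      ((s.length : Int) - b).toNat = t →
      n ≤ (tables.length : Int) →
      ((PySem.List.pyRange b (s.length : Int) 1).foldl (fun tables j =>
          ((PySem.List.pyRange 1 (min n ((s.length : Int) - j) + 1) 1).foldl (cfAltInner s j)
            (tables, ([] : List Char))).1) tables)[k]? =
        (tables[k]?).map (fun d =>
          (PySem.List.pyRange b (s.length : Int) 1).foldl (fun d j =>
            if j + ((k : Int) + 1) ≤ (s.length : Int) ∧ (k : Int) + 1 ≤ n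
            then cfBump d (cfKey s j.toNat (k + 1)) else d) d) := by
  intro t
  induction t with
  | zero =>
      intro b tables k hb hm hlen
      rw [PySem.List.pyRange_one_eq_nil (by omega)]
      simp only [List.foldl_nil]
      cases tables[k]? <;> simp
  | succ t ih =>
      intro b tables k hb hm hlen
      have hbL : b < (s.length : Int) := by omega
      rw [PySem.List.pyRange_one_cons hbL]
      simp only [List.foldl_cons]
      rw [ih (b + 1) _ k (by omega) (by omega)
        (by rw [cf_inner_len]; exact hlen)]
      rw [cf_inner_spec s n b hb (min n ((s.length : Int) - b) + 1 - 1).toNat 1 tables [] k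
        le_rfl rfl (by omega) (by simp)]
      by_cases hc : b + ((k : Int) + 1) ≤ (s.length : Int) ∧ (k : Int) + 1 ≤ n
      · rw [if_pos (by omega)]
        simp only [if_pos hc]
        cases tables[k]? <;> simp
      · rw [if_neg (by omega)]
        simp only [if_neg hc]

-- the conditional one-pass fold collapses to A's plain fold over the valid window
lemma cf_fold_collapse (s : List Char) (n : Int) (k : Nat) (hk : (k : Int) + 1 ≤ n) :
    (PySem.List.pyRange 0 (s.length : Int) 1).foldl (fun d j =>
        if j + ((k : Int) + 1) ≤ (s.length : Int) ∧ (k : Int) + 1 ≤ n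
        then cfBump d (cfKey s j.toNat (k + 1)) else d) PySem.Dict.empty =
      cfTblI s (1 + (k : Int)) := by
  unfold cfTblI
  rw [show (s.length : Int) - (1 + (k : Int)) + 1 = (s.length : Int) - (k : Int) by ring]
  rw [show (1 + (k : Int)).toNat = k + 1 by omega]
  by_cases hL : (k : Int) + 1 ≤ (s.length : Int)
  · have e2 : ∀ init : PySem.Dict String Int,
        (PySem.List.pyRange ((s.length : Int) - (k : Int)) (s.length : Int) 1).foldl (fun d j =>
          if j + ((k : Int) + 1) ≤ (s.length : Int) ∧ (k : Int) + 1 ≤ n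
          then cfBump d (cfKey s j.toNat (k + 1)) else d) init = init := by
      intro init
      rw [PySem.List.foldl_congr_mem _ _ (fun d _ => d) _
        (by
          intro acc x hx
          have := PySem.List.mem_pyRange_one.mp hx
          rw [if_neg (by omega)])]
      exact List.foldl_fixed _
    have e1 :
        (PySem.List.pyRange 0 ((s.length : Int) - (k : Int)) 1).foldl (fun d j =>
          if j + ((k : Int) + 1) ≤ (s.length : Int) ∧ (k : Int) + 1 ≤ n
          then cfBump d (cfKey s j.toNat (k + 1)) else d) PySem.Dict.empty =
        (PySem.List.pyRange 0 ((s.length : Int) - (k : Int)) 1).foldl (fun d j =>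
          cfBump d (cfKey s j.toNat (k + 1))) PySem.Dict.empty :=
      PySem.List.foldl_congr_mem _ _ _ _
        (by
          intro acc x hx
          have := PySem.List.mem_pyRange_one.mp hx
          rw [if_pos (by omega)])
    rw [PySem.List.pyRange_one_append 0 ((s.length : Int) - (k : Int)) (s.length : Int) (by omega) (by omega),
      List.foldl_append, e2, e1]
  · have h1 : PySem.List.pyRange 0 ((s.length : Int) - (k : Int)) 1 = [] :=
      PySem.List.pyRange_one_eq_nil (by omega)
    rw [h1, List.foldl_nil]
    rw [PySem.List.foldl_congr_mem _ _ (fun d _ => d) _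
      (by
        intro acc x hx
        have := PySem.List.mem_pyRange_one.mp hx
        rw [if_neg (by omega)])]
    rw [List.foldl_fixed]

-- ===== VERDICT (by name: the statement is the Claim_ definition above) =====
theorem create_frequency_tables_spec : Claim_equal_create_frequency_tables := by
  intro document n _hdom
  unfold Spec_create_frequency_tables
  rw [cfA_char]
  unfold create_frequency_tables_alt
  simp only [PySem.Str.len_eq]
  apply List.ext_getElem?
  intro k
  rw [List.getElem?_map, List.getElem?_map, PySem.List.getElem?_pyRange_one]
  rw [cf_outer_spec document.toList n ((document.toList.length : Int) - 0).toNat 0 _ k le_rfl rfl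
    (by rw [List.length_map, PySem.List.length_pyRange_one]; omega)]
  rw [List.getElem?_map, PySem.List.getElem?_pyRange_one]
  by_cases hk : k < (n + 1 - 1).toNat
  · rw [if_pos hk, if_pos (by omega)]
    simp only [Option.map_some]
    rw [cf_fold_collapse document.toList n k (by omega)]
  · rw [if_neg hk, if_neg (by omega)]
    rfl
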